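-- pv_equiv track=rewrite | github.com/litaoz/checkSubstring | noSubString.py | substringInList
-- ===== SOURCE A (Python) =====
-- def substringInList(wordList):
--     seen = set()
--
--     for word in wordList:
--         if word in seen:
--             return True
--         for comparison in seen:
--             if word in comparison or comparison in word:
--                 return True
--         seen.add(word)
--
--     return False
-- ===== SOURCE B (Python) =====
-- def substringInList(wordList):
--     distinct = list(dict.fromkeys(wordList))
--     if len(distinct) < len(wordList):
--         return True
--     words = sorted(distinct, key=len)
--     for j in range(len(words)):
--         for i in range(j):
--             if words[i] in words[j]:
--                 return True
--     return False
-- ===== Notes on version B (the rewrite author's own statement) =====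
-- stated objective: alternative
-- what changed: Replaces A's incremental seen-set loop (each word compared both directions against every earlier distinct word) by: one dedup pass whose length answers the duplicate case immediately, then a length-ascending sort of the distinct words so only the shorter-in-longer direction needs checking over index pairs.
import Mathlib
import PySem

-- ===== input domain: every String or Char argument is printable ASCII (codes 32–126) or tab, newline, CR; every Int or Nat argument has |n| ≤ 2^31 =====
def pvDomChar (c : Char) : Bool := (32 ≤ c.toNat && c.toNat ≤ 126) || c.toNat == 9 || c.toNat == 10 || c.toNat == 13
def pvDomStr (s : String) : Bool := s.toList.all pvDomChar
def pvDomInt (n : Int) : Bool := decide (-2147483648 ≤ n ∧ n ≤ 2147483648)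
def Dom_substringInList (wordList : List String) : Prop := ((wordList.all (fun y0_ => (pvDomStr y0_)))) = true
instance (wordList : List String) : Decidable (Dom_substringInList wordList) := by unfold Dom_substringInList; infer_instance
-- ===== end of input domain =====

-- B replaces A's seen-set loop by: dedup once (duplicates answer immediately), sort the distinct
-- words by length, then check only the shorter-in-longer direction over index pairs (alternative decomposition).


-- ===== PORT A =====
-- the loop over wordList carrying the 'seen' set; the inner 'for comparison in seen'
-- is an order-independent any over the set's elements
def substringInListLoop : List String → PySem.Set String → Bool
  | [], _ => false
  | word :: rest, seen =>
    if PySem.Set.contains seen word then true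
    else if seen.any (fun comparison =>
        PySem.Str.isIn word comparison || PySem.Str.isIn comparison word) then true
    else substringInListLoop rest (PySem.Set.add seen word)

def substringInList (wordList : List String) : Bool :=
  substringInListLoop wordList PySem.Set.empty

-- ===== PORT B =====
def substringInList_alt (wordList : List String) : Bool :=
  let distinct := PySem.List.dedup wordList
  if distinct.length < wordList.length then true
  else
    let words := PySem.List.sorted distinct (fun w => PySem.Str.len w)
    (List.range words.length).any fun j =>
      (List.range j).any fun i =>
        PySem.Str.isIn (words.getD i "") (words.getD j "")

-- ===== PRECONDITION & SPEC =====
def Spec_substringInList (wordList : List String) (out : Bool) : Prop := out = substringInList_alt wordList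
instance (wordList : List String) (out : Bool) : Decidable (Spec_substringInList wordList out) := by unfold Spec_substringInList; infer_instance

-- ===== CLAIM (what is proved, stated in full; the proofs are below) =====
def Claim_equal_substringInList : Prop := ∀ (wordList : List String), Dom_substringInList wordList → Spec_substringInList wordList (substringInList wordList)

-- ===== LEMMAS AND PROOFS =====

-- 'word in comparison or comparison in word' as one predicate
def pvConflict (a b : String) : Bool := PySem.Str.isIn a b || PySem.Str.isIn b a

lemma pvConflict_comm (a b : String) : pvConflict a b = pvConflict b a := by
  simp [pvConflict, Bool.or_comm]

lemma pvConflict_self (a : String) : pvConflict a a = true := by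
  have : PySem.Str.isIn a a = true := by
    rw [PySem.Str.isIn_iff_infix]
  rw [pvConflict, this, Bool.true_or]

lemma pvConflict_false_ne {a b : String} (h : pvConflict a b = false) : a ≠ b := by
  rintro rfl; rw [pvConflict_self] at h; cases h

lemma pvBool_false {b : Bool} (h : ¬ b = true) : b = false := by cases b <;> simp_all

-- characterisation of A's loop
lemma substringInListLoop_eq_false_iff (xs : List String) (seen : PySem.Set String) :
    substringInListLoop xs seen = false ↔
      (∀ w ∈ xs, ∀ c ∈ seen, pvConflict w c = false) ∧
        xs.Pairwise (fun a b => pvConflict a b = false) := by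
  induction xs generalizing seen with
  | nil => simp [substringInListLoop]
  | cons w rest ih =>
    rw [substringInListLoop]
    by_cases hw : w ∈ seen
    · rw [if_pos ((PySem.Set.contains_iff seen w).mpr hw)]
      refine iff_of_false (by simp) ?_
      rintro ⟨h1, -⟩
      have := h1 w (List.mem_cons_self ..) w hw
      rw [pvConflict_self] at this; cases this
    · rw [if_neg (fun hc => hw ((PySem.Set.contains_iff seen w).mp hc))]
      by_cases hany : (seen.any (fun comparison =>
          PySem.Str.isIn w comparison || PySem.Str.isIn comparison w)) = true
      · rw [if_pos hany]
        refine iff_of_false (by simp) ?_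
        rintro ⟨h1, -⟩
        obtain ⟨c, hcm, hcb⟩ := List.any_eq_true.mp hany
        have hcb' : pvConflict w c = true := hcb
        rw [h1 w (List.mem_cons_self ..) c hcm] at hcb'; cases hcb'
      · rw [if_neg hany, ih]
        have hany' : ∀ c ∈ seen, pvConflict w c = false := by
          intro c hc
          exact pvBool_false (fun h => hany (List.any_eq_true.mpr ⟨c, hc, h⟩))
        rw [List.pairwise_cons]
        constructor
        · rintro ⟨h1, h3⟩
          refine ⟨?_, ?_, h3⟩
          · intro v hv c hcmem
            rcases List.mem_cons.mp hv with rfl | hv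
            · exact hany' c hcmem
            · exact h1 v hv c ((PySem.Set.mem_add seen w c).mpr (Or.inl hcmem))
          · intro v hv
            have := h1 v hv w ((PySem.Set.mem_add seen w w).mpr (Or.inr rfl))
            rwa [pvConflict_comm] at this
        · rintro ⟨h1, h2, h3⟩
          refine ⟨?_, h3⟩
          intro v hv c hcmem
          rcases (PySem.Set.mem_add seen w c).mp hcmem with hcs | rfl
          · exact h1 v (List.mem_cons_of_mem _ hv) c hcs
          · rw [pvConflict_comm]; exact h2 v hv

lemma substringInList_eq_false_iff (xs : List String) :
    substringInList xs = false ↔ xs.Pairwise (fun a b => pvConflict a b = false) := by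
  rw [substringInList, substringInListLoop_eq_false_iff]
  simp [PySem.Set.empty]

lemma foldl_add_length_le (rest : List String) (t : List String) :
    (rest.foldl PySem.Set.add t).length ≤ t.length + rest.length := by
  induction rest generalizing t with
  | nil => simp
  | cons y ys ih2 =>
    simp only [List.foldl_cons]
    have h1 : (PySem.Set.add t y).length ≤ t.length + 1 := by
      simp only [PySem.Set.add]; split <;> simp
    have h2 := ih2 (PySem.Set.add t y)
    simp only [List.length_cons]
    omega

-- dedup is strictly shorter exactly on lists with duplicates
lemma foldl_add_length_lt {xs s : List String}
    (h : ¬ xs.Nodup ∨ ∃ x ∈ xs, x ∈ s) :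
    (xs.foldl PySem.Set.add s).length < s.length + xs.length := by
  induction xs generalizing s with
  | nil =>
    rcases h with h | ⟨x, hx, _⟩
    · exact absurd List.nodup_nil h
    · cases hx
  | cons x rest ih =>
    simp only [List.foldl_cons, List.length_cons]
    by_cases hxs : x ∈ s
    · have hadd : PySem.Set.add s x = s := by simp [PySem.Set.add, hxs]
      rw [hadd]
      have := foldl_add_length_le rest s
      omega
    · have hadd : PySem.Set.add s x = s ++ [x] := by simp [PySem.Set.add, hxs]
      have h' : ¬ rest.Nodup ∨ ∃ y ∈ rest, y ∈ PySem.Set.add s x := by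
        rcases h with h | ⟨y, hy, hys⟩
        · rw [List.nodup_cons] at h
          by_cases hxr : x ∈ rest
          · exact Or.inr ⟨x, hxr, by simp [hadd]⟩
          · exact Or.inl (fun hr => h ⟨hxr, hr⟩)
        · rcases List.mem_cons.mp hy with rfl | hy
          · exact absurd hys hxs
          · exact Or.inr ⟨y, hy, by simp [hadd, hys]⟩
      have := ih h'
      rw [hadd] at this ⊢
      simp only [List.length_append, List.length_cons, List.length_nil] at this
      omega

lemma dedup_length_lt_of_not_nodup {xs : List String} (h : ¬ xs.Nodup) :
    (PySem.List.dedup xs).length < xs.length := by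
  have h2 := foldl_add_length_lt (xs := xs) (s := []) (Or.inl h)
  simpa [PySem.Set.ofList_eq_foldl] using h2

-- characterisation of B
lemma substringInList_alt_eq_false_iff (xs : List String) :
    substringInList_alt xs = false ↔ xs.Pairwise (fun a b => pvConflict a b = false) := by
  by_cases hnd : xs.Nodup
  · have hded : PySem.List.dedup xs = xs := by
      simp [PySem.Set.ofList_eq_self_of_nodup xs hnd]
    simp only [substringInList_alt, hded, lt_self_iff_false, if_false]
    set words := PySem.List.sorted xs (fun w => PySem.Str.len w) with hwords
    have hperm : words.Perm xs := PySem.List.sorted_perm xs _ false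
    have hwnd : words.Nodup := (hperm.nodup_iff).mpr hnd
    have hlens : words.Pairwise (fun a b => PySem.Str.len a ≤ PySem.Str.len b) :=
      PySem.List.sorted_pairwise xs _
    have hpw : words.Pairwise (fun a b => pvConflict a b = false) ↔
        xs.Pairwise (fun a b => pvConflict a b = false) :=
      List.Perm.pairwise_iff (fun {x y} h => by rwa [pvConflict_comm]) hperm
    rw [← hpw]
    have hstep : words.Pairwise (fun a b => PySem.Str.isIn a b = false) ↔
        words.Pairwise (fun a b => pvConflict a b = false) := by
      constructor
      · intro h
        have hne : words.Pairwise (fun a b : String => a ≠ b) :=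
          List.nodup_iff_pairwise_ne.mp hwnd
        refine ((hlens.and hne).and h).imp ?_
        rintro a b ⟨⟨hlab, hab⟩, hiab⟩
        rw [pvConflict, hiab, Bool.false_or]
        by_contra hba
        rw [Bool.not_eq_false, PySem.Str.isIn_iff_infix] at hba
        have h1 := hba.length_le
        rw [PySem.Str.len_eq, PySem.Str.len_eq] at hlab
        have h2 : b.toList.length = a.toList.length := by omega
        exact hab (String.toList_inj.mp (hba.eq_of_length h2)).symm
      · intro h
        refine h.imp ?_
        intro a b hab
        rw [pvConflict, Bool.or_eq_false_iff] at hab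
        exact hab.1
    rw [← hstep, List.pairwise_iff_getElem]
    simp only [List.any_eq_false, List.mem_range, Bool.not_eq_true]
    constructor
    · intro h i j hi hj hij
      have := h j hj i hij
      rwa [List.getD_eq_getElem _ _ (hij.trans hj), List.getD_eq_getElem _ _ hj] at this
    · intro h j hj i hij
      rw [List.getD_eq_getElem _ _ (hij.trans hj), List.getD_eq_getElem _ _ hj]
      exact h i j (hij.trans hj) hj hij
  · have hlt := dedup_length_lt_of_not_nodup hnd
    simp only [substringInList_alt]
    rw [if_pos hlt]
    refine iff_of_false (by simp) ?_
    intro h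
    exact hnd (List.nodup_iff_pairwise_ne.mpr (h.imp fun hab => pvConflict_false_ne hab))

-- ===== VERDICT (by name: the statement is the Claim_ definition above) =====
theorem substringInList_spec : Claim_equal_substringInList := by
  intro wordList _
  unfold Spec_substringInList
  have h1 := substringInList_eq_false_iff wordList
  have h2 := substringInList_alt_eq_false_iff wordList
  cases hA : substringInList wordList <;> cases hB : substringInList_alt wordList <;>
    simp_all
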